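-- pv_equiv track=rewrite | github.com/Sasi3854/PSCStreamlitV5 | ngram_analyzer.py | merge_ngrams
-- ===== SOURCE A (Python) =====
-- from typing import List, Tuple, Set
--
-- def merge_ngrams(bigrams: List[str], trigrams: List[str]) -> List[str]:
--     """Merge bigrams and trigrams, removing redundant bigrams."""
--     # Split trigrams into sets of words for quick subset testing
--     trigram_sets = [set(ng.split()) for ng in trigrams]
--
--     cleaned_bigrams = []
--     for bg in bigrams:
--         bg_set = set(bg.split())
--         # If bg_set is NOT a subset of any trigram_set, we keep it
--         if not any(bg_set.issubset(tg_set) for tg_set in trigram_sets):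
--             cleaned_bigrams.append(bg)
--
--     # Combine cleaned bigrams + trigrams and remove duplicates
--     merged = list(dict.fromkeys(cleaned_bigrams + trigrams))
--     return merged
-- ===== SOURCE B (Python) =====
-- def merge_ngrams(bigrams, trigrams):
--     """Merge bigrams and trigrams, removing redundant bigrams.
--
--     Inverted-index version: map each word to the set of trigram indices
--     containing it; a bigram is redundant iff the intersection of its words'
--     posting sets (seeded with the universe of trigram indices) is nonempty.
--     """
--     index = {}
--     for i, tg in enumerate(trigrams):
--         for w in tg.split():
--             index.setdefault(w, set()).add(i)
--     universe = set(range(len(trigrams)))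
--     kept = []
--     for bg in bigrams:
--         cands = universe
--         for w in bg.split():
--             cands = cands & index.get(w, set())
--         if not cands:
--             kept.append(bg)
--     return list(dict.fromkeys(kept + trigrams))
-- ===== Notes on version B (the rewrite author's own statement) =====
-- stated objective: faster
-- what changed: Replaces A's per-bigram scan over all trigram word-sets with an inverted index from words to trigram-index posting sets; a bigram is dropped iff the intersection of its words' posting sets (seeded with the full index universe) is nonempty.
import Mathlib
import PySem

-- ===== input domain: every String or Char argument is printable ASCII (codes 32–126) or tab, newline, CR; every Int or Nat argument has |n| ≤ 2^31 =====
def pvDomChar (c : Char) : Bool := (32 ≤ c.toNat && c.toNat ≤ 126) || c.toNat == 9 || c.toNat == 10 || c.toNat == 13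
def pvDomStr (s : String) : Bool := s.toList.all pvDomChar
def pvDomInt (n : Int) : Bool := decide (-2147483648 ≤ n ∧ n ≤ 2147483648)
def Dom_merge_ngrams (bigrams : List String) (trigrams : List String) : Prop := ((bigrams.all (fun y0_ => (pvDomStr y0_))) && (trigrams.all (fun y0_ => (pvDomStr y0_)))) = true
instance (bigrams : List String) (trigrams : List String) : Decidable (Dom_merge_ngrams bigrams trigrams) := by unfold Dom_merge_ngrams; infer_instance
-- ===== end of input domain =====

-- B replaces A's per-bigram scan of all trigram word-sets by an inverted index
-- (word -> posting set of trigram indices); a bigram is dropped iff the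
-- intersection of its words' posting sets, seeded with the univ, is nonempty.


-- ===== PORT A =====
def merge_ngrams (bigrams : List String) (trigrams : List String) : List String :=
  let trigram_sets := trigrams.map (fun ng => PySem.Set.ofList (PySem.Str.split₀ ng))
  let cleaned := bigrams.foldl
    (fun acc bg =>
      let bg_set := PySem.Set.ofList (PySem.Str.split₀ bg)
      if !(trigram_sets.any (fun tg => PySem.Set.issubset bg_set tg)) then acc ++ [bg] else acc) []
  PySem.List.dedup (cleaned ++ trigrams)

-- ===== PORT B =====
-- index.setdefault(w, set()).add(i)  =  modify w empty (add · i)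
def merge_ngrams_alt (bigrams : List String) (trigrams : List String) : List String :=
  let index : PySem.Dict String (PySem.Set Int) :=
    (PySem.List.enumerate trigrams 0).foldl
      (fun d p => (PySem.Str.split₀ p.2).foldl
        (fun d w => d.modify w PySem.Set.empty (fun s => PySem.Set.add s p.1)) d)
      PySem.Dict.empty
  let univ : PySem.Set Int := PySem.Set.ofList (PySem.List.pyRange 0 (trigrams.length : Int) 1)
  let kept := bigrams.foldl
    (fun acc bg =>
      let cands := (PySem.Str.split₀ bg).foldl
        (fun c w => PySem.Set.inter c (index.getD w PySem.Set.empty)) univ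
      if cands.isEmpty then acc ++ [bg] else acc) []
  PySem.List.dedup (kept ++ trigrams)

-- ===== PRECONDITION & SPEC =====
def Spec_merge_ngrams (bigrams : List String) (trigrams : List String) (out : List String) : Prop := out = merge_ngrams_alt bigrams trigrams
instance (bigrams : List String) (trigrams : List String) (out : List String) : Decidable (Spec_merge_ngrams bigrams trigrams out) := by unfold Spec_merge_ngrams; infer_instance

-- ===== CLAIM (what is proved, stated in full; the proofs are below) =====
def Claim_equal_merge_ngrams : Prop := ∀ (bigrams : List String) (trigrams : List String), Dom_merge_ngrams bigrams trigrams → Spec_merge_ngrams bigrams trigrams (merge_ngrams bigrams trigrams)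

-- ===== LEMMAS AND PROOFS =====

-- one trigram's words added to the index: posting-set membership
theorem pv_index_inner (ws : List String) (d : PySem.Dict String (PySem.Set Int)) (v : Int) (u : String) (i : Int) :
    i ∈ (ws.foldl (fun d w => d.modify w PySem.Set.empty (fun s => PySem.Set.add s v)) d).getD u PySem.Set.empty
      ↔ i ∈ d.getD u PySem.Set.empty ∨ (i = v ∧ u ∈ ws) := by
  induction ws generalizing d with
  | nil => simp
  | cons w ws ih =>
    simp only [List.foldl_cons, ih, PySem.Dict.getD_modify, List.mem_cons]
    split_ifs with h
    · subst h
      simp [PySem.Set.mem_add]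
      tauto
    · constructor
      · rintro (h1 | h2) <;> tauto
      · rintro (h1 | ⟨h1, (h2 | h2)⟩) <;> tauto

-- the whole index: posting-set membership
theorem pv_index_outer (l : List (Int × String)) (d : PySem.Dict String (PySem.Set Int)) (u : String) (i : Int) :
    i ∈ (l.foldl (fun d p => (PySem.Str.split₀ p.2).foldl
          (fun d w => d.modify w PySem.Set.empty (fun s => PySem.Set.add s p.1)) d) d).getD u PySem.Set.empty
      ↔ i ∈ d.getD u PySem.Set.empty ∨ ∃ p ∈ l, i = p.1 ∧ u ∈ PySem.Str.split₀ p.2 := by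
  induction l generalizing d with
  | nil => simp
  | cons p l ih =>
    simp only [List.foldl_cons, ih, pv_index_inner, List.mem_cons]
    constructor
    · rintro ((h | h) | ⟨q, hq, h⟩)
      · tauto
      · exact Or.inr ⟨p, Or.inl rfl, h⟩
      · exact Or.inr ⟨q, Or.inr hq, h⟩
    · rintro (h | ⟨q, (rfl | hq), h⟩)
      · tauto
      · tauto
      · exact Or.inr ⟨q, hq, h⟩

-- the intersection loop: membership
theorem pv_inter_fold (post : String → PySem.Set Int) (ws : List String) (U : PySem.Set Int) (i : Int) :
    i ∈ ws.foldl (fun c w => PySem.Set.inter c (post w)) U ↔ i ∈ U ∧ ∀ w ∈ ws, i ∈ post w := by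
  induction ws generalizing U with
  | nil => simp
  | cons w ws ih =>
    simp only [List.foldl_cons, ih, PySem.Set.mem_inter, List.mem_cons, forall_eq_or_imp]
    tauto

theorem pv_foldl_ext {α β : Type} (f g : α → β → α) (l : List β) (a : α)
    (h : ∀ acc x, x ∈ l → f acc x = g acc x) : l.foldl f a = l.foldl g a := by
  induction l generalizing a with
  | nil => rfl
  | cons x l ih => simp only [List.foldl_cons, h a x (List.mem_cons_self), ih _ (fun acc y hy => h acc y (List.mem_cons_of_mem _ hy))]

-- the per-bigram keep conditions of A and B coincide
theorem pv_cond_eq (trigrams : List String) (bg : String) :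
    ((PySem.Str.split₀ bg).foldl
        (fun c w => PySem.Set.inter c
          (((PySem.List.enumerate trigrams 0).foldl
              (fun d p => (PySem.Str.split₀ p.2).foldl
                (fun d w => d.modify w PySem.Set.empty (fun s => PySem.Set.add s p.1)) d)
              PySem.Dict.empty).getD w PySem.Set.empty))
        (PySem.Set.ofList (PySem.List.pyRange 0 (trigrams.length : Int) 1))).isEmpty
      = !((trigrams.map (fun ng => PySem.Set.ofList (PySem.Str.split₀ ng))).any
          (fun tg => PySem.Set.issubset (PySem.Set.ofList (PySem.Str.split₀ bg)) tg)) := by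
  apply Bool.eq_iff_iff.mpr
  rw [List.isEmpty_iff, List.eq_nil_iff_forall_not_mem, Bool.not_eq_true', List.any_eq_false]
  constructor
  · intro hempty tg htg hsub
    obtain ⟨ng, hng, rfl⟩ := List.mem_map.mp htg
    obtain ⟨k, hk, rfl⟩ := List.mem_iff_getElem.mp hng
    apply hempty (k : Int)
    rw [pv_inter_fold]
    constructor
    · rw [PySem.Set.mem_ofList, PySem.List.mem_pyRange_one]
      constructor
      · exact Int.natCast_nonneg k
      · exact_mod_cast hk
    · intro w hw
      rw [pv_index_outer]
      refine Or.inr ⟨((k : Int), trigrams[k]), ?_, rfl, ?_⟩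
      · rw [PySem.List.mem_enumerate_iff]
        exact ⟨k, hk, by simp⟩
      · have := (PySem.Set.issubset_iff _ _).mp hsub w (by rw [PySem.Set.mem_ofList]; exact hw)
        rwa [PySem.Set.mem_ofList] at this
  · intro hno i hi
    rw [pv_inter_fold] at hi
    obtain ⟨hU, hall⟩ := hi
    rw [PySem.Set.mem_ofList, PySem.List.mem_pyRange_one] at hU
    obtain ⟨h0, hn⟩ := hU
    have hklt : i.toNat < trigrams.length := by omega
    refine absurd ?_ (hno (PySem.Set.ofList (PySem.Str.split₀ trigrams[i.toNat]))
      (List.mem_map.mpr ⟨trigrams[i.toNat], List.getElem_mem hklt, rfl⟩))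
    rw [PySem.Set.issubset_iff]
    intro w hw
    rw [PySem.Set.mem_ofList] at hw ⊢
    have := hall w hw
    rw [pv_index_outer] at this
    rcases this with h | ⟨p, hp, hiv, hwp⟩
    · simp at h
    · rw [PySem.List.mem_enumerate_iff] at hp
      obtain ⟨k, hk, rfl⟩ := hp
      simp only [zero_add] at hiv hwp
      have he : trigrams[i.toNat]'hklt = trigrams[k]'hk := by congr 1; omega
      rw [he]
      exact hwp

-- the two cleaned-bigram accumulations coincide
theorem pv_clean_eq (bigrams trigrams : List String) :
    bigrams.foldl
      (fun acc bg =>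
        if !((trigrams.map (fun ng => PySem.Set.ofList (PySem.Str.split₀ ng))).any
              (fun tg => PySem.Set.issubset (PySem.Set.ofList (PySem.Str.split₀ bg)) tg))
        then acc ++ [bg] else acc) []
    = bigrams.foldl
      (fun acc bg =>
        if ((PySem.Str.split₀ bg).foldl
              (fun c w => PySem.Set.inter c
                (((PySem.List.enumerate trigrams 0).foldl
                    (fun d p => (PySem.Str.split₀ p.2).foldl
                      (fun d w => d.modify w PySem.Set.empty (fun s => PySem.Set.add s p.1)) d)
                    PySem.Dict.empty).getD w PySem.Set.empty))
              (PySem.Set.ofList (PySem.List.pyRange 0 (trigrams.length : Int) 1))).isEmpty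
        then acc ++ [bg] else acc) [] := by
  apply pv_foldl_ext
  intro acc bg _
  rw [pv_cond_eq]

-- ===== VERDICT (by name: the statement is the Claim_ definition above) =====
theorem merge_ngrams_spec : Claim_equal_merge_ngrams := by
  intro bigrams trigrams _
  show PySem.List.dedup (_ ++ trigrams) = PySem.List.dedup (_ ++ trigrams)
  rw [pv_clean_eq bigrams trigrams]
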